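-- pv_equiv track=rewrite | github.com/Parth-coderr/Bajaj_Finserv_TestVIT_ParthSinha | REST_API.py | alternating_caps
-- ===== SOURCE A (Python) =====
-- def alternating_caps(s):
--     result = ''
--     upper = True
--     for c in s[::-1]:
--         if c.isalpha():
--             result += c.upper() if upper else c.lower()
--             upper = not upper
--     return result
-- ===== SOURCE B (Python) =====
-- def alternating_caps(s):
--     # Forward pass: keep letters in original order, decide each letter's case
--     # from its distance to the end (n-1-j), then reverse once at the end.
--     letters = [c for c in s if c.isalpha()]
--     n = len(letters)
--     cased = [c.upper() if (n - 1 - j) % 2 == 0 else c.lower()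
--              for j, c in enumerate(letters)]
--     return ''.join(reversed(cased))
-- ===== Notes on version B (the rewrite author's own statement) =====
-- stated objective: alternative
-- what changed: Instead of reversing the string first and alternating case with a running boolean toggle, B scans the string FORWARD, keeps the letters in original order, assigns each letter's case from its distance to the end ((n-1-j) parity anchored to the total letter count), and reverses once at the end; no reversal before filtering and no mutable toggle state.
import Mathlib
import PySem

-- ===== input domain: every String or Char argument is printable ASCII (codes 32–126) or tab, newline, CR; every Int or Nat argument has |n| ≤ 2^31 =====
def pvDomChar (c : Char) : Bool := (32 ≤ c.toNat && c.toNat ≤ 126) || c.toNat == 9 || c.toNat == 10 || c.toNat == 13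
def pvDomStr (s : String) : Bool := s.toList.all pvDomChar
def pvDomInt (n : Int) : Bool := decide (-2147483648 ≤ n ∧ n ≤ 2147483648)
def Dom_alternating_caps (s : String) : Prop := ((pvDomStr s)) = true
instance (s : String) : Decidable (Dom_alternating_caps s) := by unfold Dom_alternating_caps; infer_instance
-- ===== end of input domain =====

-- B scans the string forward (no prior reversal, no running toggle): it keeps the letters
-- in original order, cases each by its distance to the end ((n-1-j) parity), and reverses once.

-- ===== PORT A =====
def alternating_caps (s : String) : String :=
  let rev := ((PySem.Str.slice? s none none (-1)).getD "").toList
  let st := rev.foldl (fun (acc : List Char × Bool) c =>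
    if PySem.Chars.isalpha c then
      (acc.1 ++ [if acc.2 then PySem.Chars.upperChar c else PySem.Chars.lowerChar c], !acc.2)
    else acc) ([], true)
  String.ofList st.1

-- ===== PORT B =====
def alternating_caps_alt (s : String) : String :=
  let letters := s.toList.filter PySem.Chars.isalpha
  let n : Int := letters.length
  let cased := (PySem.List.enumerate letters).map (fun p =>
    if PySem.Int.mod (n - 1 - p.1) 2 == 0 then PySem.Chars.upperChar p.2 else PySem.Chars.lowerChar p.2)
  String.ofList cased.reverse

-- ===== PRECONDITION & SPEC =====
def Spec_alternating_caps (s : String) (out : String) : Prop := out = alternating_caps_alt s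
instance (s : String) (out : String) : Decidable (Spec_alternating_caps s out) := by unfold Spec_alternating_caps; infer_instance

-- ===== CLAIM (what is proved, stated in full; the proofs are below) =====
def Claim_equal_alternating_caps : Prop := ∀ (s : String), Dom_alternating_caps s → Spec_alternating_caps s (alternating_caps s)

-- ===== LEMMAS AND PROOFS =====

lemma parity_toggle (k : Int) :
    (!(PySem.Int.mod k 2 == 0)) = (PySem.Int.mod (k + 1) 2 == 0) := by
  rw [PySem.Int.mod_eq_emod_of_pos (a := k) (by norm_num),
    PySem.Int.mod_eq_emod_of_pos (a := k + 1) (by norm_num)]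
  rcases Int.emod_two_eq k with h | h <;> simp [h, Int.add_emod]

-- A's loop equals a parity-indexed map over the enumerated filtered list.
lemma alternating_loop (l res : List Char) (k : Int) :
    (l.foldl (fun (acc : List Char × Bool) c =>
        if PySem.Chars.isalpha c then
          (acc.1 ++ [if acc.2 then PySem.Chars.upperChar c else PySem.Chars.lowerChar c], !acc.2)
        else acc) (res, PySem.Int.mod k 2 == 0)).1
      = res ++ (PySem.List.enumerate (l.filter PySem.Chars.isalpha) k).map (fun p =>
          if PySem.Int.mod p.1 2 == 0 then PySem.Chars.upperChar p.2 else PySem.Chars.lowerChar p.2) := by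
  induction l generalizing res k with
  | nil => simp
  | cons c cs ih =>
    by_cases h : PySem.Chars.isalpha c = true
    · simp only [List.foldl_cons, h, if_pos, List.filter_cons_of_pos h,
        PySem.List.enumerate_cons, List.map_cons]
      rw [parity_toggle k, ih, List.append_assoc]
      rfl
    · simp only [List.foldl_cons, if_neg h, List.filter_cons_of_neg h]
      exact ih res k

-- The parity-indexed map over the reversed list equals the reverse of the
-- end-distance-indexed map over the original list.
lemma rev_enum_map (L : List Char) :
    (PySem.List.enumerate L.reverse).map (fun p =>
        if PySem.Int.mod p.1 2 == 0 then PySem.Chars.upperChar p.2 else PySem.Chars.lowerChar p.2)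
      = (((PySem.List.enumerate L).map (fun p =>
          if PySem.Int.mod ((L.length : Int) - 1 - p.1) 2 == 0 then PySem.Chars.upperChar p.2
          else PySem.Chars.lowerChar p.2)).reverse) := by
  apply List.ext_getElem
  · simp [PySem.List.length_enumerate]
  · intro i h1 h2
    simp only [List.length_map, List.length_reverse, PySem.List.length_enumerate] at h1 h2 ⊢
    rw [List.getElem_reverse]
    rw [List.getElem_map, List.getElem_map]
    rw [PySem.List.getElem_enumerate, PySem.List.getElem_enumerate]
    simp only [List.length_map, PySem.List.length_enumerate]
    have hrev : L.reverse[i]'(by simpa using h1) = L[L.length - 1 - i]'(by omega) := by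
      rw [List.getElem_reverse]
    have hidx : ((L.length : Int) - 1 - ((0 : Int) + (L.length - 1 - i : Nat))) = (0 : Int) + i := by
      omega
    rw [hrev, hidx]

-- ===== VERDICT (by name: the statement is the Claim_ definition above) =====
theorem alternating_caps_spec : Claim_equal_alternating_caps := by
  intro s _
  show alternating_caps s = alternating_caps_alt s
  unfold alternating_caps alternating_caps_alt
  rw [PySem.Str.slice?_none_none_neg_one]
  have h := alternating_loop s.toList.reverse [] 0
  simp only [show (PySem.Int.mod 0 2 == 0) = true from by decide] at h
  simp only [Option.getD_some, String.toList_ofList]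
  rw [h, List.nil_append, List.filter_reverse, rev_enum_map]
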